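-- pv_equiv track=rewrite | github.com/CeciliaPYY/road2beEngineer | thorn2offer/chapter3/In29-printMatrixClockwise.py | printMatrixCore
-- ===== SOURCE A (Python) =====
-- def printMatrixCore(numbers, columns, rows, start):
--     endX = columns - 1 - start
--     endY = rows -1 - start
--     res = []
--     for i in range(start, endX + 1):
--         res.append(numbers[start][i])
--     if (start < endY):
--         # 如果至少有两行，那么则执行第二步
--         for i in range(start + 1, endY + 1):
--             res.append(numbers[i][endX])
--     if (start < endX and start < endY):
--         # 如果至少有两行两列，那么则执行第三步
--         for i in range(endX - 1, start - 1, -1):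
--             res.append(numbers[endY][i])
--     if (start < endX and start < endY - 1):
--         for i in range(endY - 1, start, -1):
--         # 如果至少有三行两列，那么则执行第三步
--             res.append(numbers[i][start])
--     return res
-- ===== SOURCE B (Python) =====
-- def printMatrixCore(numbers, columns, rows, start):
--     # Generate the ring by a single index formula: the k-th output cell is
--     # computed arithmetically from k, instead of four separate edge loops.
--     endX = columns - 1 - start
--     endY = rows - 1 - start
--     a = max(endX - start + 1, 0)                            # top edge length
--     b = max(endY - start, 0)                                # right edge length
--     c = max(endX - start, 0) if start < endY else 0         # bottom edge length
--     d = max(endY - 1 - start, 0) if start < endX else 0     # left edge length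
--
--     def cell(k):
--         if k < a:
--             return numbers[start][start + k]
--         k -= a
--         if k < b:
--             return numbers[start + 1 + k][endX]
--         k -= b
--         if k < c:
--             return numbers[endY][endX - 1 - k]
--         k -= c
--         return numbers[endY - 1 - k][start]
--
--     return [cell(k) for k in range(a + b + c + d)]
-- ===== Notes on version B (the rewrite author's own statement) =====
-- stated objective: alternative
-- what changed: B replaces A's four separate edge loops (each appending to a shared result list) by a single pass over linear indices 0..total-1 with an arithmetic formula mapping each index to its ring cell.
import Mathlib
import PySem

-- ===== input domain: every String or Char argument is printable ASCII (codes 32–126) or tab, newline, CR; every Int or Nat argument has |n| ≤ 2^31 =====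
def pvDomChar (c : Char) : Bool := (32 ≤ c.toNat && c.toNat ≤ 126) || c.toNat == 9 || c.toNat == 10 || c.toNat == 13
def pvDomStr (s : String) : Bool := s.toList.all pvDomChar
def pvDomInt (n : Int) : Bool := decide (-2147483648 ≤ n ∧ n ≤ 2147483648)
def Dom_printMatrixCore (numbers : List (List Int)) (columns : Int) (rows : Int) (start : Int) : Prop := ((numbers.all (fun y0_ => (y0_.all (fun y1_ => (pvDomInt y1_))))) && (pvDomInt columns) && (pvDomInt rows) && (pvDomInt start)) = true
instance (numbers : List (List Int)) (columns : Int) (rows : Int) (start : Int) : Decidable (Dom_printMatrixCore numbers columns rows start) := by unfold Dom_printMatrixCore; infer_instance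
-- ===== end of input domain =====

-- B replaces A's four separate edge loops by a single pass over linear indices
-- 0..total-1 with an arithmetic index→cell formula (objective: alternative).

-- numbers[r][c] with Python index semantics; default 0 only outside Pre_ (where Python raises).
def pvGet2 (numbers : List (List Int)) (r c : Int) : Int :=
  ((PySem.List.pyGet? numbers r).bind (fun row => PySem.List.pyGet? row c)).getD 0

-- ===== PORT A =====
def printMatrixCore (numbers : List (List Int)) (columns : Int) (rows : Int) (start : Int) : List Int :=
  let endX := columns - 1 - start
  let endY := rows - 1 - start
  let res : List Int := []
  let res := (PySem.List.pyRange start (endX + 1) 1).foldl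
      (fun r i => r ++ [pvGet2 numbers start i]) res
  let res := if start < endY then
      (PySem.List.pyRange (start + 1) (endY + 1) 1).foldl
        (fun r i => r ++ [pvGet2 numbers i endX]) res
    else res
  let res := if start < endX ∧ start < endY then
      (PySem.List.pyRange (endX - 1) (start - 1) (-1)).foldl
        (fun r i => r ++ [pvGet2 numbers endY i]) res
    else res
  let res := if start < endX ∧ start < endY - 1 then
      (PySem.List.pyRange (endY - 1) start (-1)).foldl
        (fun r i => r ++ [pvGet2 numbers i start]) res
    else res
  res

-- ===== PORT B =====
def printMatrixCore_alt (numbers : List (List Int)) (columns : Int) (rows : Int) (start : Int) : List Int :=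
  let endX := columns - 1 - start
  let endY := rows - 1 - start
  let a := max (endX - start + 1) 0
  let b := max (endY - start) 0
  let c := if start < endY then max (endX - start) 0 else 0
  let d := if start < endX then max (endY - 1 - start) 0 else 0
  let cell : Int → Int := fun k =>
    if k < a then pvGet2 numbers start (start + k)
    else
      let k := k - a
      if k < b then pvGet2 numbers (start + 1 + k) endX
      else
        let k := k - b
        if k < c then pvGet2 numbers endY (endX - 1 - k)
        else
          let k := k - c
          pvGet2 numbers (endY - 1 - k) start
  (PySem.List.pyRange 0 (a + b + c + d) 1).map cell

-- ===== PRECONDITION & SPEC =====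
-- pvRowsHit: p holds on every row of `numbers` whose (0-based) position is reached by
-- some Python index i in [lo, hi] (a negative index i reaches position i + len).
def pvRowsHit (numbers : List (List Int)) (lo hi : Int) (p : List Int → Bool) : Bool :=
  (PySem.List.enumerate numbers 0).all (fun jr =>
    !(decide (lo ≤ jr.1 ∧ jr.1 ≤ hi) ||
      decide (lo ≤ jr.1 - (numbers.length : Int) ∧ jr.1 - (numbers.length : Int) ≤ hi)) || p jr.2)

-- pvPreB: for each of A's four loops (with its guard), the row indices it uses lie in
-- Python range (-len ≤ i < len) and every reached row is long enough for the column
-- indices it uses — i.e. exactly the inputs on which the Python A raises no IndexError.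
def pvPreB (numbers : List (List Int)) (columns rows start : Int) : Bool :=
  let X := columns - 1 - start
  let Y := rows - 1 - start
  let n : Int := numbers.length
  (!decide (start ≤ X) ||
    (decide (PySem.Raise.InRange numbers.length start) &&
     pvRowsHit numbers start start (fun row => decide (-(row.length : Int) ≤ start ∧ X < (row.length : Int))))) &&
  (!decide (start < Y) ||
    (decide (-n ≤ start + 1 ∧ Y < n) &&
     pvRowsHit numbers (start + 1) Y (fun row => decide (PySem.Raise.InRange row.length X)))) &&
  (!(decide (start < X) && decide (start < Y)) ||
    (decide (PySem.Raise.InRange numbers.length Y) &&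
     pvRowsHit numbers Y Y (fun row => decide (-(row.length : Int) ≤ start ∧ X - 1 < (row.length : Int))))) &&
  (!(decide (start < X) && decide (start < Y - 1)) ||
    (decide (-n ≤ start + 1 ∧ Y - 1 < n) &&
     pvRowsHit numbers (start + 1) (Y - 1) (fun row => decide (PySem.Raise.InRange row.length start))))

-- Pre_ holds exactly when every index access A performs is in range, i.e. exactly
-- when the Python A returns without an IndexError.
def Pre_printMatrixCore (numbers : List (List Int)) (columns : Int) (rows : Int) (start : Int) : Prop :=
  pvPreB numbers columns rows start = true

instance (numbers : List (List Int)) (columns : Int) (rows : Int) (start : Int) : Decidable (Pre_printMatrixCore numbers columns rows start) := by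
  unfold Pre_printMatrixCore; infer_instance

def pvWitness_printMatrixCore : List (List Int) × Int × Int × Int :=
  ([[1, 2, 3], [4, 5, 6], [7, 8, 9]], 3, 3, 0)

def Spec_printMatrixCore (numbers : List (List Int)) (columns : Int) (rows : Int) (start : Int) (out : List Int) : Prop := out = printMatrixCore_alt numbers columns rows start
instance (numbers : List (List Int)) (columns : Int) (rows : Int) (start : Int) (out : List Int) : Decidable (Spec_printMatrixCore numbers columns rows start out) := by unfold Spec_printMatrixCore; infer_instance

-- ===== CLAIM (what is proved, stated in full; the proofs are below) =====
def Claim_equal_printMatrixCore : Prop := ∀ (numbers : List (List Int)) (columns : Int) (rows : Int) (start : Int), Dom_printMatrixCore numbers columns rows start → Pre_printMatrixCore numbers columns rows start → Spec_printMatrixCore numbers columns rows start (printMatrixCore numbers columns rows start)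

-- ===== LEMMAS AND PROOFS =====

theorem pvClip (lo hi : Int) : PySem.List.pyRange lo hi 1 = PySem.List.pyRange lo (lo + max (hi - lo) 0) 1 := by
  by_cases h : hi ≤ lo
  · rw [PySem.List.pyRange_one_eq_nil h, PySem.List.pyRange_one_eq_nil (by omega)]
  · congr 1; omega

theorem pvShift (lo n : Int) (g : Int → Int) :
    (PySem.List.pyRange lo (lo + n) 1).map g = (PySem.List.pyRange 0 n 1).map (fun k => g (lo + k)) := by
  rw [PySem.List.pyRange_one, PySem.List.pyRange_one]
  simp [List.map_map]

theorem pvSegUpX (lo hi : Int) (f : Int → Int) :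
    (PySem.List.pyRange lo hi 1).map f
      = (PySem.List.pyRange 0 (max (hi - lo) 0) 1).map (fun k => f (lo + k)) := by
  rw [pvClip lo hi, pvShift]

theorem pvSegDown (hi lo : Int) (f : Int → Int) :
    (PySem.List.pyRange hi lo (-1)).map f
      = (PySem.List.pyRange 0 (max (hi - lo) 0) 1).map (fun k => f (hi - k)) := by
  rw [PySem.List.pyRange_neg_one, PySem.List.pyRange_one]
  have h : (max (hi - lo) 0 - 0).toNat = (hi - lo).toNat := by omega
  rw [h]
  simp [List.map_map]

theorem pvSegUp (lo hi n : Int) (h : n = max (hi - lo) 0) (f : Int → Int) :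
    (PySem.List.pyRange lo hi 1).map f
      = (PySem.List.pyRange 0 n 1).map (fun k => f (lo + k)) := by
  subst h; exact pvSegUpX lo hi f

theorem pvSegDownN (hi lo n : Int) (h : n = max (hi - lo) 0) (f : Int → Int) :
    (PySem.List.pyRange hi lo (-1)).map f
      = (PySem.List.pyRange 0 n 1).map (fun k => f (hi - k)) := by
  subst h; exact pvSegDown hi lo f

theorem pvQuad (g1 g2 g3 g4 : Int → Int) (a b c d : Int) (ha : 0 ≤ a) (hb : 0 ≤ b) (hc : 0 ≤ c) (hd : 0 ≤ d) :
    (PySem.List.pyRange 0 (a + b + c + d) 1).map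
      (fun k => if k < a then g1 k else if k - a < b then g2 (k - a)
        else if k - a - b < c then g3 (k - a - b) else g4 (k - a - b - c))
    = (PySem.List.pyRange 0 a 1).map g1 ++ (PySem.List.pyRange 0 b 1).map g2
      ++ (PySem.List.pyRange 0 c 1).map g3 ++ (PySem.List.pyRange 0 d 1).map g4 := by
  rw [PySem.List.pyRange_one_append 0 (a+b+c) (a+b+c+d) (by omega) (by omega),
      PySem.List.pyRange_one_append 0 (a+b) (a+b+c) (by omega) (by omega),
      PySem.List.pyRange_one_append 0 a (a+b) (by omega) (by omega)]
  simp only [List.map_append, List.append_assoc]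
  congr 1
  · apply List.map_congr_left; intro k hk; rw [PySem.List.mem_pyRange_one] at hk
    split_ifs <;> first | rfl | (exfalso; omega)
  congr 1
  · rw [pvShift a b]; apply List.map_congr_left; intro k hk; rw [PySem.List.mem_pyRange_one] at hk
    split_ifs <;> first | (exfalso; omega) | (congr 1; omega)
  congr 1
  · rw [pvShift (a+b) c]; apply List.map_congr_left; intro k hk; rw [PySem.List.mem_pyRange_one] at hk
    split_ifs <;> first | (exfalso; omega) | (congr 1; omega)
  · rw [pvShift (a+b+c) d]; apply List.map_congr_left; intro k hk; rw [PySem.List.mem_pyRange_one] at hk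
    split_ifs <;> first | (exfalso; omega) | (congr 1; omega)

theorem ports_eq (numbers : List (List Int)) (columns rows start : Int) :
    printMatrixCore numbers columns rows start = printMatrixCore_alt numbers columns rows start := by
  simp only [printMatrixCore, printMatrixCore_alt, PySem.List.foldl_append_singleton_eq_map, List.nil_append]
  have hq := pvQuad
    (fun k => pvGet2 numbers start (start + k))
    (fun k => pvGet2 numbers (start + 1 + k) (columns - 1 - start))
    (fun k => pvGet2 numbers (rows - 1 - start) (columns - 1 - start - 1 - k))
    (fun k => pvGet2 numbers (rows - 1 - start - 1 - k) start)
    (max (columns - 1 - start - start + 1) 0)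
    (max (rows - 1 - start - start) 0)
    (if start < rows - 1 - start then max (columns - 1 - start - start) 0 else 0)
    (if start < columns - 1 - start then max (rows - 1 - start - 1 - start) 0 else 0)
    (by omega) (by omega) (by split <;> omega) (by split <;> omega)
  beta_reduce at hq
  rw [hq]
  rw [pvSegUp start (columns - 1 - start + 1) (max (columns - 1 - start - start + 1) 0) (by omega)]
  rw [pvSegUp (start + 1) (rows - 1 - start + 1) (max (rows - 1 - start - start) 0) (by omega)]
  rw [pvSegDownN (columns - 1 - start - 1) (start - 1) (max (columns - 1 - start - start) 0) (by omega)]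
  rw [pvSegDownN (rows - 1 - start - 1) start (max (rows - 1 - start - 1 - start) 0) (by omega)]
  by_cases hY : start < rows - 1 - start
  · by_cases hX : start < columns - 1 - start
    · by_cases hY1 : start < rows - 1 - start - 1
      · simp only [hX, hY, hY1, and_self, if_true]
      · simp only [hX, hY, hY1, and_self, and_false, if_true, if_false]
        rw [show max (rows - 1 - start - 1 - start) 0 = 0 from by omega]
        simp [List.append_assoc]
    · simp only [hX, hY, false_and, if_false, if_true]
      rw [show max (columns - 1 - start - start) 0 = 0 from by omega]
      simp
  · have hY1 : ¬ start < rows - 1 - start - 1 := by omega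
    simp only [hY, hY1, and_false, if_false]
    rw [show max (rows - 1 - start - start) 0 = 0 from by omega,
        show max (rows - 1 - start - 1 - start) 0 = 0 from by omega]
    simp [ite_self]

-- ===== VERDICT (by name: the statement is the Claim_ definition above) =====
theorem printMatrixCore_spec : Claim_equal_printMatrixCore := by
  intro numbers columns rows start _ _
  unfold Spec_printMatrixCore
  exact ports_eq numbers columns rows start
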